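-- pv_equiv track=rewrite | github.com/CemAlpturk/pytest-delta | pytest_delta/graph.py | resolve_import
-- ===== SOURCE A (Python) =====
-- def resolve_import(module_name: str, module_map: dict[str, str]) -> str | None:
--     # Exact match
--     if module_name in module_map:
--         return module_map[module_name]
--     # Try progressively shorter prefixes (from X.Y.Z import something -> try X.Y, then X)
--     parts = module_name.split(".")
--     for i in range(len(parts) - 1, 0, -1):
--         prefix = ".".join(parts[:i])
--         if prefix in module_map:
--             return module_map[prefix]
--     return None
-- ===== SOURCE B (Python) =====
-- def resolve_import(module_name, module_map):
--     # Single scan over the map: keep the longest key that is the whole name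
--     # or a dot-boundary prefix of it; return its value (or None).
--     best_key = None
--     best_val = None
--     for key, val in module_map.items():
--         if key == module_name or module_name.startswith(key + "."):
--             if best_key is None or len(key) > len(best_key):
--                 best_key = key
--                 best_val = val
--     return best_val
-- ===== Notes on version B (the rewrite author's own statement) =====
-- stated objective: alternative
-- what changed: Instead of generating progressively shorter dotted prefixes of the name and probing the map for each, B makes one scan over the map's entries keeping the longest key that equals the name or is a dot-boundary prefix of it, and returns its value.
import Mathlib
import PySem

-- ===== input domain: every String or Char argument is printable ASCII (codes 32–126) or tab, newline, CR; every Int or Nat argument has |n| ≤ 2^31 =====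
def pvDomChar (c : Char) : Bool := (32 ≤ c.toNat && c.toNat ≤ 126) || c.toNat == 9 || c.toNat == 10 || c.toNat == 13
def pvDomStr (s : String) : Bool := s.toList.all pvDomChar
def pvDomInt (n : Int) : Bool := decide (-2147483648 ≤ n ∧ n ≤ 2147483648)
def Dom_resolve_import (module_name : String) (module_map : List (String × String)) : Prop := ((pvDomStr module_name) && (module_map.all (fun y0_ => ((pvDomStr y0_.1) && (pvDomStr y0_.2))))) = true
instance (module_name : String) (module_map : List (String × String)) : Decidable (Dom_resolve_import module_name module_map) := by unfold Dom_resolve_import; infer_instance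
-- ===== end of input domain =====

-- B replaces A's generate-prefixes-and-probe loop by a single scan over the map's
-- entries keeping the longest key that is the name or a dot-boundary prefix of it
-- (alternative algorithm, same result).


-- ===== PORT A =====
-- the 'for i in range(len(parts)-1, 0, -1): …' loop with its early return
def resolve_import_loop (d : PySem.Dict String String) (parts : List (List Char)) : List Int → Option String
  | [] => none
  | i :: rest =>
    let pre := String.ofList (PySem.Chars.join ['.'] (PySem.List.slice parts none (some i)))
    if d.contains pre then d.get? pre else resolve_import_loop d parts rest

def resolve_import (module_name : String) (module_map : List (String × String)) : Option String :=
  let d := PySem.Dict.ofList module_map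
  if d.contains module_name then d.get? module_name
  else
    let parts := PySem.Chars.splitOn module_name.toList ['.']
    resolve_import_loop d parts (PySem.List.pyRange ((parts.length : Int) - 1) 0 (-1))

-- ===== PORT B =====
-- 'key == module_name or module_name.startswith(key + ".")'
def resolve_import_acc (module_name : String) (key : String) : Bool :=
  key == module_name || PySem.Str.startswith module_name (key ++ ".")

-- the body of B's 'for key, val in module_map.items(): …' loop, acting on (best_key, best_val)
def resolve_import_step (module_name : String) (best : Option (String × String))
    (kv : String × String) : Option (String × String) :=
  if resolve_import_acc module_name kv.1 then
    match best with
    | none => some kv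
    | some p => if PySem.Str.len kv.1 > PySem.Str.len p.1 then some kv else some p
  else best

def resolve_import_alt (module_name : String) (module_map : List (String × String)) : Option String :=
  let d := PySem.Dict.ofList module_map
  match d.items.foldl (resolve_import_step module_name) none with
  | some p => some p.2
  | none => none

-- ===== PRECONDITION & SPEC =====
def Spec_resolve_import (module_name : String) (module_map : List (String × String)) (out : Option String) : Prop := out = resolve_import_alt module_name module_map
instance (module_name : String) (module_map : List (String × String)) (out : Option String) : Decidable (Spec_resolve_import module_name module_map out) := by unfold Spec_resolve_import; infer_instance

-- ===== CLAIM (what is proved, stated in full; the proofs are below) =====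
def Claim_equal_resolve_import : Prop := ∀ (module_name : String) (module_map : List (String × String)), Dom_resolve_import module_name module_map → Spec_resolve_import module_name module_map (resolve_import module_name module_map)

-- ===== LEMMAS AND PROOFS =====

-- simple structural model of "...".split(".") (single-character separator)
def mySplit : List Char → List (List Char)
  | [] => [[]]
  | c :: rest =>
    if c = '.' then [] :: mySplit rest
    else
      match mySplit rest with
      | [] => [[c]]
      | q :: qs => (c :: q) :: qs

theorem mySplit_ne_nil (s : List Char) : mySplit s ≠ [] := by
  cases s with
  | nil => simp [mySplit]
  | cons c rest =>
    simp only [mySplit]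
    split_ifs
    · simp
    · cases h : mySplit rest <;> simp

theorem splitOn_go_eq (fuel : Nat) : ∀ (l cur : List Char) (acc : List (List Char)),
    l.length < fuel →
    PySem.Chars.splitOn.go ['.'] fuel l cur acc =
      acc.reverse ++ (match mySplit l with
        | [] => [cur.reverse]
        | q :: qs => (cur.reverse ++ q) :: qs) := by
  induction fuel with
  | zero => intro l cur acc h; omega
  | succ fuel ih =>
    intro l cur acc h
    cases l with
    | nil => simp [PySem.Chars.splitOn.go, mySplit]
    | cons c rest =>
      by_cases hc : c = '.'
      · subst hc
        have hpre : List.isPrefixOf ['.'] ('.' :: rest) = true := by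
          simp [List.isPrefixOf]
        rw [PySem.Chars.splitOn.go]
        simp only [hpre, if_true]
        have hdrop : List.drop (['.'] : List Char).length ('.' :: rest) = rest := rfl
        rw [hdrop, ih rest [] (cur.reverse :: acc) (by simpa using Nat.lt_of_succ_lt_succ h)]
        cases hr : mySplit rest with
        | nil => exact absurd hr (mySplit_ne_nil rest)
        | cons q qs => simp [mySplit, hr]
      · have hpre : List.isPrefixOf ['.'] (c :: rest) = true ↔ False := by
          simp [List.isPrefixOf]
          exact fun hx => hc hx.symm
        rw [PySem.Chars.splitOn.go]
        simp only [eq_iff_iff.mpr hpre, if_false]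
        rw [ih rest (c :: cur) acc (by simpa using Nat.lt_of_succ_lt_succ h)]
        cases hr : mySplit rest with
        | nil => exact absurd hr (mySplit_ne_nil rest)
        | cons q qs => simp [mySplit, hr, hc]

theorem splitOn_eq (s : List Char) : PySem.Chars.splitOn s ['.'] = mySplit s := by
  rw [PySem.Chars.splitOn, splitOn_go_eq (s.length + 1) s [] [] (Nat.lt_succ_self _)]
  cases hr : mySplit s with
  | nil => exact absurd hr (mySplit_ne_nil s)
  | cons q qs => simp

theorem join_append : ∀ (xs ys : List (List Char)), xs ≠ [] → ys ≠ [] →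
    PySem.Chars.join ['.'] (xs ++ ys) =
      PySem.Chars.join ['.'] xs ++ '.' :: PySem.Chars.join ['.'] ys := by
  intro xs
  induction xs with
  | nil => intro ys h _; exact absurd rfl h
  | cons a xs ih =>
    intro ys _ hy
    cases xs with
    | nil =>
      cases ys with
      | nil => exact absurd rfl hy
      | cons y ys' =>
        simp [PySem.Chars.join_cons_cons, PySem.Chars.join_singleton]
    | cons b xs' =>
      have h1 : (a :: b :: xs') ++ ys = a :: b :: (xs' ++ ys) := by simp
      rw [h1, PySem.Chars.join_cons_cons, PySem.Chars.join_cons_cons]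
      have := ih ys (by simp) hy
      simp only [List.cons_append] at this ⊢
      rw [this]
      simp

theorem join_mySplit (s : List Char) : PySem.Chars.join ['.'] (mySplit s) = s := by
  induction s with
  | nil => simp [mySplit, PySem.Chars.join_singleton]
  | cons c rest ih =>
    by_cases hc : c = '.'
    · subst hc
      have h1 : mySplit ('.' :: rest) = [([] : List Char)] ++ mySplit rest := by
        simp [mySplit]
      rw [h1, join_append [[]] (mySplit rest) (by simp) (mySplit_ne_nil rest)]
      simp [PySem.Chars.join_singleton, ih]
    · cases hr : mySplit rest with
      | nil => exact absurd hr (mySplit_ne_nil rest)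
      | cons q qs =>
        rw [hr] at ih
        have h1 : mySplit (c :: rest) = (c :: q) :: qs := by simp [mySplit, hc, hr]
        rw [h1]
        cases qs with
        | nil =>
          simp only [PySem.Chars.join_singleton] at ih ⊢
          rw [← ih]
        | cons q2 qs2 =>
          rw [PySem.Chars.join_cons_cons] at ih ⊢
          rw [← ih]
          simp

theorem mySplit_append : ∀ (a b : List Char),
    mySplit (a ++ '.' :: b) = mySplit a ++ mySplit b := by
  intro a
  induction a with
  | nil => intro b; simp [mySplit]
  | cons c a' ih =>
    intro b
    by_cases hc : c = '.'
    · subst hc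
      have e1 : ∀ l, mySplit ('.' :: l) = [] :: mySplit l := fun l => by simp [mySplit]
      rw [List.cons_append, e1, e1, ih b, List.cons_append]
    · have e2 : ∀ l, mySplit (c :: l) =
          match mySplit l with | [] => [[c]] | q :: qs => (c :: q) :: qs :=
        fun l => by simp [mySplit, hc]
      cases hq : mySplit a' with
      | nil => exact absurd hq (mySplit_ne_nil a')
      | cons q qs =>
        rw [List.cons_append, e2, e2, ih b, hq]
        simp

-- the i-th candidate prefix: ".".join(parts[:i])
def cand (P : List (List Char)) (i : Nat) : String :=
  String.ofList (PySem.Chars.join ['.'] (P.take i))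

theorem join_take_mono (P : List (List Char)) (i j : Nat) (hij : i ≤ j) (hj : j ≤ P.length) :
    (PySem.Chars.join ['.'] (P.take i)).length ≤ (PySem.Chars.join ['.'] (P.take j)).length := by
  rcases Nat.eq_zero_or_pos i with hi0 | hip
  · subst hi0; simp [PySem.Chars.join_nil]
  rcases Nat.eq_or_lt_of_le hij with he | hlt
  · subst he; exact le_rfl
  have hsplit : P.take j = P.take i ++ (P.take j).drop i := by
    conv_lhs => rw [← List.take_append_drop i (P.take j)]
    rw [List.take_take, Nat.min_eq_left hij]
  have hlen1 : (P.take i).length = i := List.length_take_of_le (by omega)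
  have hlen2 : ((P.take j).drop i).length = j - i := by
    rw [List.length_drop, List.length_take_of_le hj]
  rw [hsplit, join_append (P.take i) ((P.take j).drop i)
        (by intro hnil; rw [hnil] at hlen1; simp at hlen1; omega)
        (by intro hnil; rw [hnil] at hlen2; simp at hlen2; omega)]
  simp

-- an accepted key is a prefix (as char list) of the name
theorem acc_prefix (n k : String) (h : resolve_import_acc n k = true) :
    k.toList <+: n.toList := by
  unfold resolve_import_acc at h
  rw [Bool.or_eq_true, beq_iff_eq] at h
  rcases h with h | h
  · rw [h]
  · simp only [PySem.Str.startswith] at h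
    rw [PySem.Chars.startswith_iff] at h
    rw [String.toList_append] at h
    have h2 : k.toList <+: k.toList ++ (".").toList := List.prefix_append _ _
    exact h2.trans h

-- accepted keys are exactly the candidates ".".join(parts[:i]), 1 ≤ i ≤ len(parts)
theorem acc_iff (n k : String) :
    resolve_import_acc n k = true ↔
      ∃ i, 1 ≤ i ∧ i ≤ (mySplit n.toList).length ∧
        k.toList = PySem.Chars.join ['.'] ((mySplit n.toList).take i) := by
  constructor
  · intro h
    unfold resolve_import_acc at h
    rw [Bool.or_eq_true, beq_iff_eq] at h
    rcases h with h | h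
    · refine ⟨(mySplit n.toList).length, ?_, le_rfl, ?_⟩
      · have := mySplit_ne_nil n.toList
        cases hr : mySplit n.toList with
        | nil => exact absurd hr this
        | cons q qs => simp
      · rw [List.take_length, join_mySplit, h]
    · simp only [PySem.Str.startswith] at h
      rw [PySem.Chars.startswith_iff, String.toList_append] at h
      obtain ⟨rest, hrest⟩ := h
      have hn : n.toList = k.toList ++ '.' :: rest := by
        rw [← hrest]
        simp [show (".").toList = ['.'] from rfl]
      refine ⟨(mySplit k.toList).length, ?_, ?_, ?_⟩
      · have := mySplit_ne_nil k.toList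
        cases hr : mySplit k.toList with
        | nil => exact absurd hr this
        | cons q qs => simp
      · rw [hn, mySplit_append]
        simp only [List.length_append]
        omega
      · rw [hn, mySplit_append, List.take_left, join_mySplit]
  · rintro ⟨i, h1, h2, h3⟩
    unfold resolve_import_acc
    rw [Bool.or_eq_true, beq_iff_eq]
    rcases Nat.eq_or_lt_of_le h2 with he | hlt
    · left
      apply String.toList_inj.mp
      rw [h3, he, List.take_length, join_mySplit]
    · right
      simp only [PySem.Str.startswith]
      rw [PySem.Chars.startswith_iff, String.toList_append]
      have hsplit : mySplit n.toList =
          (mySplit n.toList).take i ++ (mySplit n.toList).drop i :=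
        (List.take_append_drop i (mySplit n.toList)).symm
      have hlen1 : ((mySplit n.toList).take i).length = i := List.length_take_of_le (by omega)
      have hlen2 : ((mySplit n.toList).drop i).length = (mySplit n.toList).length - i := by
        rw [List.length_drop]
      have hjoin : n.toList =
          PySem.Chars.join ['.'] ((mySplit n.toList).take i) ++
            '.' :: PySem.Chars.join ['.'] ((mySplit n.toList).drop i) := by
        conv_lhs => rw [← join_mySplit n.toList]
        conv_lhs => rw [hsplit]
        exact join_append _ _
          (by intro hnil; rw [hnil] at hlen1; simp at hlen1; omega)
          (by intro hnil; rw [hnil] at hlen2; simp at hlen2; omega)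
      rw [hjoin, ← h3]
      refine ⟨PySem.Chars.join ['.'] ((mySplit n.toList).drop i), ?_⟩
      simp [show (".").toList = ['.'] from rfl]

-- reference form of A's candidate scan, counting i = a, a-1, …, 1
def refA (d : PySem.Dict String String) (P : List (List Char)) : Nat → Option String
  | 0 => none
  | a + 1 => if d.contains (cand P (a + 1)) then d.get? (cand P (a + 1)) else refA d P a

theorem loop_eq_refA (d : PySem.Dict String String) (P : List (List Char)) (a : Nat) :
    resolve_import_loop d P (PySem.List.pyRange (a : Int) 0 (-1)) = refA d P a := by
  induction a with
  | zero =>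
    rw [PySem.List.pyRange_neg_one_eq_nil (by norm_num)]
    rfl
  | succ a ih =>
    have hcast : ((a + 1 : Nat) : Int) = (a : Int) + 1 := by push_cast; ring
    rw [hcast, PySem.List.pyRange_neg_one_cons (by positivity)]
    have hsub : (a : Int) + 1 - 1 = (a : Int) := by ring
    rw [hsub]
    show (if d.contains (String.ofList (PySem.Chars.join ['.']
            (PySem.List.slice P none (some ((a : Int) + 1))))) = true then
          d.get? (String.ofList (PySem.Chars.join ['.']
            (PySem.List.slice P none (some ((a : Int) + 1)))))
        else resolve_import_loop d P (PySem.List.pyRange (a : Int) 0 (-1))) = refA d P (a + 1)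
    rw [← hcast, PySem.List.slice_to_natCast, ih]
    rfl

theorem A_eq_refA (n : String) (mm : List (String × String)) :
    resolve_import n mm =
      refA (PySem.Dict.ofList mm) (mySplit n.toList) (mySplit n.toList).length := by
  cases hP : mySplit n.toList with
  | nil => exact absurd hP (mySplit_ne_nil n.toList)
  | cons p ps =>
    rw [← hP]
    have hm : (mySplit n.toList).length = ps.length + 1 := by rw [hP]; rfl
    have hcand : cand (mySplit n.toList) (mySplit n.toList).length = n := by
      unfold cand
      rw [List.take_length, join_mySplit, String.ofList_toList]
    show (if (PySem.Dict.ofList mm).contains n = true then (PySem.Dict.ofList mm).get? n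
      else
        resolve_import_loop (PySem.Dict.ofList mm) (PySem.Chars.splitOn n.toList ['.'])
          (PySem.List.pyRange (((PySem.Chars.splitOn n.toList ['.']).length : Int) - 1) 0 (-1)))
        = refA (PySem.Dict.ofList mm) (mySplit n.toList) (mySplit n.toList).length
    rw [splitOn_eq]
    have hcast : ((mySplit n.toList).length : Int) - 1 = ((ps.length : Nat) : Int) := by
      rw [hm]; push_cast; ring
    rw [hcast, loop_eq_refA]
    rw [hm]
    show _ = (if (PySem.Dict.ofList mm).contains (cand (mySplit n.toList) (ps.length + 1)) = true
      then (PySem.Dict.ofList mm).get? (cand (mySplit n.toList) (ps.length + 1))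
      else refA (PySem.Dict.ofList mm) (mySplit n.toList) ps.length)
    rw [← hm, hcand]

theorem step_none_eq (n : String) (kv : String × String) :
    resolve_import_step n none kv =
      if resolve_import_acc n kv.1 then some kv else none := rfl

theorem step_some_eq (n : String) (p kv : String × String) :
    resolve_import_step n (some p) kv =
      if resolve_import_acc n kv.1 then
        (if PySem.Str.len kv.1 > PySem.Str.len p.1 then some kv else some p)
      else some p := rfl

theorem strlen_eq (s : String) : PySem.Str.len s = s.toList.length := by simp [pysem]

theorem alt_eq (n : String) (mm : List (String × String)) :
    resolve_import_alt n mm =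
      match (PySem.Dict.ofList mm).items.foldl (resolve_import_step n) none with
      | some p => some p.2
      | none => none := rfl

theorem foldl_none_of_all (n : String) : ∀ (L : List (String × String)),
    (∀ kv ∈ L, resolve_import_acc n kv.1 = false) →
    L.foldl (resolve_import_step n) none = none := by
  intro L
  induction L with
  | nil => intro _; rfl
  | cons kv L ih =>
    intro h
    rw [List.foldl_cons, step_none_eq, h kv (by simp)]
    exact ih (fun kv' h' => h kv' (by simp [h']))

theorem foldl_eq_none (n : String) : ∀ (L : List (String × String)) (b : Option (String × String)),
    L.foldl (resolve_import_step n) b = none →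
      b = none ∧ ∀ kv ∈ L, resolve_import_acc n kv.1 = false := by
  intro L
  induction L with
  | nil => exact fun b h => ⟨h, by simp⟩
  | cons kv L ih =>
    intro b h
    rw [List.foldl_cons] at h
    obtain ⟨h1, h2⟩ := ih _ h
    rcases hb : b with _ | p
    · rw [hb, step_none_eq] at h1
      by_cases hacc : resolve_import_acc n kv.1 = true
      · rw [if_pos hacc] at h1
        exact absurd h1 (by simp)
      · refine ⟨rfl, fun kv' h' => ?_⟩
        rcases List.mem_cons.mp h' with he | hm
        · rw [he]; simpa using hacc
        · exact h2 kv' hm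
    · rw [hb, step_some_eq] at h1
      split_ifs at h1 with h <;> exact absurd h1 (by simp)

theorem foldl_mem (n : String) : ∀ (L : List (String × String)) (b : Option (String × String))
    (p : String × String), L.foldl (resolve_import_step n) b = some p →
      b = some p ∨ (p ∈ L ∧ resolve_import_acc n p.1 = true) := by
  intro L
  induction L with
  | nil => exact fun b p h => Or.inl h
  | cons kv L ih =>
    intro b p h
    rw [List.foldl_cons] at h
    rcases ih _ p h with hstep | ⟨hmem, hacc⟩
    · rcases hb : b with _ | q
      · rw [hb, step_none_eq] at hstep
        by_cases hx : resolve_import_acc n kv.1 = true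
        · rw [if_pos hx] at hstep
          obtain rfl := Option.some_inj.mp hstep
          exact Or.inr ⟨by simp, hx⟩
        · rw [if_neg hx] at hstep
          exact absurd hstep (by simp)
      · rw [hb, step_some_eq] at hstep
        by_cases hx : resolve_import_acc n kv.1 = true
        · rw [if_pos hx] at hstep
          by_cases hlen : PySem.Str.len kv.1 > PySem.Str.len q.1
          · rw [if_pos hlen] at hstep
            obtain rfl := Option.some_inj.mp hstep
            exact Or.inr ⟨by simp, hx⟩
          · rw [if_neg hlen] at hstep
            exact Or.inl hstep
        · rw [if_neg hx] at hstep
          exact Or.inl hstep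
    · exact Or.inr ⟨List.mem_cons_of_mem _ hmem, hacc⟩

theorem foldl_max (n : String) : ∀ (L : List (String × String)) (b : Option (String × String))
    (p : String × String), L.foldl (resolve_import_step n) b = some p →
      (∀ q, b = some q → q.1.toList.length ≤ p.1.toList.length) ∧
      ∀ kv ∈ L, resolve_import_acc n kv.1 = true → kv.1.toList.length ≤ p.1.toList.length := by
  intro L
  induction L with
  | nil =>
    intro b p h
    refine ⟨fun q hq => ?_, by simp⟩
    rw [hq] at h
    simp only [List.foldl_nil, Option.some_inj] at h
    rw [h]
  | cons kv L ih =>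
    intro b p h
    rw [List.foldl_cons] at h
    obtain ⟨H1, H2⟩ := ih _ p h
    have hstep_ge : ∀ q, b = some q → q.1.toList.length ≤ p.1.toList.length := by
      intro q hq
      subst hq
      rw [step_some_eq] at H1
      split_ifs at H1 with hx hlen
      · have h1 := H1 kv rfl
        rw [strlen_eq, strlen_eq] at hlen
        omega
      · exact H1 q rfl
      · exact H1 q rfl
    refine ⟨hstep_ge, fun kv' h' hacc' => ?_⟩
    rcases List.mem_cons.mp h' with he | hm
    · subst he
      rcases hb : b with _ | q
      · rw [hb, step_none_eq, if_pos hacc'] at H1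
        exact H1 kv' rfl
      · rw [hb, step_some_eq, if_pos hacc'] at H1
        split_ifs at H1 with hlen
        · exact H1 kv' rfl
        · have hq := H1 q rfl
          rw [strlen_eq, strlen_eq] at hlen
          omega
    · exact H2 kv' hm hacc'

set_option maxHeartbeats 1000000 in
theorem main_lemma (n : String) (mm : List (String × String)) :
    ∀ a, a ≤ (mySplit n.toList).length →
      (∀ j, a < j → j ≤ (mySplit n.toList).length →
        (PySem.Dict.ofList mm).contains (cand (mySplit n.toList) j) = false) →
      refA (PySem.Dict.ofList mm) (mySplit n.toList) a = resolve_import_alt n mm := by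
  intro a
  induction a with
  | zero =>
    intro _ hyp
    have hnone : (PySem.Dict.ofList mm).items.foldl (resolve_import_step n) none = none := by
      apply foldl_none_of_all
      intro kv hkv
      by_contra hx
      rw [Bool.not_eq_false] at hx
      obtain ⟨i, h1, h2, h3⟩ := (acc_iff n kv.1).mp hx
      have hk : cand (mySplit n.toList) i = kv.1 := by
        unfold cand
        rw [← h3, String.ofList_toList]
      have hcont : (PySem.Dict.ofList mm).contains kv.1 = true :=
        (PySem.Dict.contains_iff_mem_keys _ _).mpr (PySem.Dict.mem_keys_of_mem_items _ hkv)
      rw [← hk] at hcont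
      rw [hyp i h1 h2] at hcont
      exact Bool.false_ne_true hcont
    show none = resolve_import_alt n mm
    rw [alt_eq, hnone]
  | succ a ih =>
    intro ha hyp
    by_cases hc : (PySem.Dict.ofList mm).contains (cand (mySplit n.toList) (a + 1)) = true
    · have hget : ∃ v, (PySem.Dict.ofList mm).get? (cand (mySplit n.toList) (a + 1)) = some v := by
        have := PySem.Dict.contains_eq_isSome_get?
          (d := PySem.Dict.ofList mm) (k := cand (mySplit n.toList) (a + 1))
        rw [hc] at this
        exact Option.isSome_iff_exists.mp this.symm
      obtain ⟨v, hv⟩ := hget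
      have hcv : (cand (mySplit n.toList) (a + 1), v) ∈ (PySem.Dict.ofList mm).items :=
        PySem.Dict.mem_items_of_get?_eq_some _ hv
      have hca : (cand (mySplit n.toList) (a + 1)).toList =
          PySem.Chars.join ['.'] ((mySplit n.toList).take (a + 1)) := by
        unfold cand; rw [String.toList_ofList]
      have hacc_c : resolve_import_acc n (cand (mySplit n.toList) (a + 1)) = true :=
        (acc_iff n _).mpr ⟨a + 1, by omega, ha, hca⟩
      cases hfold : (PySem.Dict.ofList mm).items.foldl (resolve_import_step n) none with
      | none =>
        obtain ⟨_, hall⟩ := foldl_eq_none n _ none hfold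
        rw [hall _ hcv] at hacc_c
        exact absurd hacc_c (by simp)
      | some p =>
        rcases foldl_mem n _ none p hfold with hbad | ⟨hpmem, hpacc⟩
        · exact absurd hbad (by simp)
        have hmax := (foldl_max n _ none p hfold).2
        have hlen1 : (cand (mySplit n.toList) (a + 1)).toList.length ≤ p.1.toList.length :=
          hmax (cand (mySplit n.toList) (a + 1), v) hcv hacc_c
        obtain ⟨i, hi1, hi2, hi3⟩ := (acc_iff n p.1).mp hpacc
        have hple : i ≤ a + 1 := by
          by_contra hgt
          rw [Nat.not_le] at hgt
          have hfalse := hyp i hgt hi2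
          have hpk : cand (mySplit n.toList) i = p.1 := by
            unfold cand; rw [← hi3, String.ofList_toList]
          have hcont : (PySem.Dict.ofList mm).contains p.1 = true :=
            (PySem.Dict.contains_iff_mem_keys _ _).mpr (PySem.Dict.mem_keys_of_mem_items _ hpmem)
          rw [← hpk, hfalse] at hcont
          exact Bool.false_ne_true hcont
        have hlen2 : p.1.toList.length ≤ (cand (mySplit n.toList) (a + 1)).toList.length := by
          rw [hi3, hca]
          exact join_take_mono (mySplit n.toList) i (a + 1) hple ha
        have hpc : p.1 = cand (mySplit n.toList) (a + 1) := by
          apply String.toList_inj.mp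
          have hpre_p := acc_prefix n p.1 hpacc
          have hpre_c := acc_prefix n _ hacc_c
          exact (List.prefix_of_prefix_length_le hpre_p hpre_c hlen2).eq_of_length
            (Nat.le_antisymm hlen2 hlen1)
        have hpv : p.2 = v := by
          have hg := PySem.Dict.get?_of_mem_items _ hpmem (PySem.Dict.nodup_keys_ofList mm)
          rw [hpc, hv] at hg
          exact (Option.some_inj.mp hg).symm
        show (if (PySem.Dict.ofList mm).contains (cand (mySplit n.toList) (a + 1)) = true
            then (PySem.Dict.ofList mm).get? (cand (mySplit n.toList) (a + 1))
            else refA (PySem.Dict.ofList mm) (mySplit n.toList) a) = resolve_import_alt n mm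
        rw [if_pos hc, hv, alt_eq, hfold]
        show some v = some p.2
        rw [hpv]
    · have hstep := ih (by omega) (fun j hj1 hj2 => by
        rcases Nat.lt_or_ge (a + 1) j with hgt | hle
        · exact hyp j hgt hj2
        · have : j = a + 1 := by omega
          rw [this]
          simpa using hc)
      show (if (PySem.Dict.ofList mm).contains (cand (mySplit n.toList) (a + 1)) = true
          then (PySem.Dict.ofList mm).get? (cand (mySplit n.toList) (a + 1))
          else refA (PySem.Dict.ofList mm) (mySplit n.toList) a) = resolve_import_alt n mm
      rw [if_neg hc]
      exact hstep

-- ===== VERDICT (by name: the statement is the Claim_ definition above) =====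
theorem resolve_import_spec : Claim_equal_resolve_import := by
  intro n mm _
  unfold Spec_resolve_import
  rw [A_eq_refA]
  exact main_lemma n mm _ le_rfl (fun j h1 h2 => absurd h2 (by omega))
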